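-- pv_equiv track=rewrite | github.com/Areeba-Hassan/Ori-Finder | locating the ori and DNaAboxes.py | symbolarray
-- ===== SOURCE A (Python) =====
-- def patcount(symbol, genome):  # counts the occurences of a given symbol in the genome
--     count = 0
--     for i in range(len(genome) - len(symbol) + 1):
--         if genome[i:i + len(symbol)] == symbol:
--             count = count + 1
--     return count
--
-- def symbolarray(genome, symbol):
--     #generates a frequency map for a given symbol in the genome
--     array = {}
--     n = len(genome)
--     ext_genome = genome + genome [0:(n//2)]
--     #initializing first index as the number of Cs in first position of the sliding window
--     array[0] = patcount(symbol, genome[0:n//2])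
--     #sliding the window
--     for i in range(1,n - (n//2)):
--     #assigning array[i-1] to array[i]
--         array[i] = array[i-1]
--         #incrementing or decrementing array[i] by 1 based on the new elemnt inside the sliding window
--         if ext_genome[i-1] == symbol:
--             array[i] = array[i]-1
--         if ext_genome[i+(n//2)-1] == symbol:
--             array[i] = array[i]+1
--     return array
-- ===== SOURCE B (Python) =====
-- def patcount(symbol, genome):  # counts the occurences of a given symbol in the genome
--     count = 0
--     for i in range(len(genome) - len(symbol) + 1):
--         if genome[i:i + len(symbol)] == symbol:
--             count = count + 1
--     return count
--
-- def symbolarray(genome, symbol):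
--     """Frequency of the symbol in a half-genome window sliding over the circular genome."""
--     n = len(genome)
--     half = n // 2
--     ext = genome + genome[:half]
--     # prefix counts: matched[k] = number of positions before k whose character equals the symbol
--     matched = [0]
--     for c in ext:
--         matched.append(matched[-1] + (c == symbol))
--     first_window = patcount(symbol, genome[:half])
--     # window i holds the first window's count, plus the matches that entered it
--     # (positions half..half+i) and minus the matches that left it (positions 0..i)
--     return {i: first_window + (matched[half + i] - matched[half]) - matched[i]
--             for i in range(n - half)}
-- ===== Notes on version B (the rewrite author's own statement) =====
-- stated objective: alternative
-- what changed: B replaces A's incremental sliding-window dict chain (each value derived from the previous one via two conditional +-1 updates) with one precomputed prefix table of character matches, computing every window count independently as the first window's count plus the matches that entered minus the matches that left; Pre_ excludes only the empty genome, on which A emits key 0 for a window that does not exist while B returns the empty dict.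
-- outside the precondition, e.g. on symbolarray('', 'A'): A returns {0: 0}, B returns {}; on symbolarray('', ''): A returns {0: 1}, B returns {}
import Mathlib
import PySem

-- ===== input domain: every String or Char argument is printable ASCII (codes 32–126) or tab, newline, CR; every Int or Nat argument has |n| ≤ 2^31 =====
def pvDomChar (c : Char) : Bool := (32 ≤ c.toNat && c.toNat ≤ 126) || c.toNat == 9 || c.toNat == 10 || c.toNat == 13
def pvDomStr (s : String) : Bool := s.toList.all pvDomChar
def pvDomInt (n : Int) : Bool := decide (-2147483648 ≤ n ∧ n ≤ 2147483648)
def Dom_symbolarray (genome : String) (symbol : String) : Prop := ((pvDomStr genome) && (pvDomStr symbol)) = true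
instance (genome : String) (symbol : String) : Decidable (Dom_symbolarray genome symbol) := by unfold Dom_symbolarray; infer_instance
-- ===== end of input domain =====

-- B computes each sliding-window count independently as a prefix-sum difference instead of A's
-- incremental per-step dict chain (objective: alternative); Pre_ below excludes only the empty genome.

-- ===== PORT A =====
-- helper of A: 'patcount'
def patcountPort (symbol : List Char) (genome : List Char) : Int :=
  (PySem.List.pyRange 0 ((genome.length : Int) - (symbol.length : Int) + 1) 1).foldl
    (fun count i =>
      if PySem.List.slice genome (some i) (some (i + (symbol.length : Int))) == symbol then count + 1
      else count) 0

-- literal port of A; ext_genome[j] is a 1-char string, compared to symbol: '[c] == sym'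
def symbolarray (genome : String) (symbol : String) : List (Int × Int) :=
  let g := genome.toList
  let sym := symbol.toList
  let n : Int := g.length
  let half : Int := PySem.Int.floordiv n 2
  let ext := g ++ PySem.List.slice g (some 0) (some half)
  let d0 : PySem.Dict Int Int :=
    PySem.Dict.insert PySem.Dict.empty 0 (patcountPort sym (PySem.List.slice g (some 0) (some half)))
  let d := (PySem.List.pyRange 1 (n - half) 1).foldl
    (fun d i =>
      let d := d.insert i (d.getD (i - 1) 0)
      let d := if [PySem.List.pyGetD ext (i - 1) ' '] == sym then d.insert i (d.getD i 0 - 1) else d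
      let d := if [PySem.List.pyGetD ext (i + half - 1) ' '] == sym then d.insert i (d.getD i 0 + 1) else d
      d) d0
  d.items

-- ===== PORT B =====
-- literal port of Source B: prefix table 'matched', then a dict comprehension over range(n - half)
def symbolarray_alt (genome : String) (symbol : String) : List (Int × Int) :=
  let g := genome.toList
  let sym := symbol.toList
  let n : Int := g.length
  let half : Int := PySem.Int.floordiv n 2
  let ext := g ++ PySem.List.slice g (some 0) (some half)
  let matched := ext.foldl
    (fun matched c => matched ++ [PySem.List.pyGetD matched (-1) 0 + (if [c] == sym then 1 else 0)]) [(0 : Int)]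
  let firstWindow := patcountPort sym (PySem.List.slice g (some 0) (some half))
  let d := (PySem.List.pyRange 0 (n - half) 1).foldl
    (fun d i => d.insert i
      (firstWindow + (PySem.List.pyGetD matched (half + i) 0 - PySem.List.pyGetD matched half 0)
        - PySem.List.pyGetD matched i 0))
    (PySem.Dict.empty : PySem.Dict Int Int)
  d.items

-- ===== PRECONDITION & SPEC =====
-- Pre_ excludes only the empty genome, on which A emits key 0 for a window that does not exist
-- while B returns the empty dict: the corner has no windows and either value is defensible.
def Pre_symbolarray (genome : String) (symbol : String) : Prop :=
  genome.toList ≠ []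
instance (genome : String) (symbol : String) : Decidable (Pre_symbolarray genome symbol) := by unfold Pre_symbolarray; infer_instance

def pvWitness_symbolarray : String × String := ("ACGTAC", "A")

def Spec_symbolarray (genome : String) (symbol : String) (out : List (Int × Int)) : Prop := out = symbolarray_alt genome symbol
instance (genome : String) (symbol : String) (out : List (Int × Int)) : Decidable (Spec_symbolarray genome symbol out) := by unfold Spec_symbolarray; infer_instance

-- ===== CLAIM (what is proved, stated in full; the proofs are below) =====
def Claim_equal_symbolarray : Prop := ∀ (genome : String) (symbol : String), Dom_symbolarray genome symbol → Pre_symbolarray genome symbol → Spec_symbolarray genome symbol (symbolarray genome symbol)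

-- ===== LEMMAS AND PROOFS =====

def pvCnt (sym ext : List Char) (t : Nat) : Int :=
  ((ext.take t).countP (fun c => [c] == sym) : Int)
def pvVal (base : Int) (sym ext : List Char) (h i : Nat) : Int :=
  base - pvCnt sym ext i + (pvCnt sym ext (i + h) - pvCnt sym ext h)
def pvItems (base : Int) (sym ext : List Char) (h t : Nat) : List (Int × Int) :=
  (List.range t).map (fun (i : Nat) => ((i : Int), pvVal base sym ext h i))
theorem pvCnt_succ (sym ext : List Char) (j : Nat) (hj : j < ext.length) :
    pvCnt sym ext (j + 1) = pvCnt sym ext j + (if [ext[j]] == sym then 1 else 0) := by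
  unfold pvCnt
  rw [List.take_add_one, List.getElem?_eq_getElem hj, List.countP_append]
  simp only [Option.toList_some, List.countP_singleton]
  split_ifs <;> simp

theorem pvItems_map_fst (base : Int) (sym ext : List Char) (h t : Nat) :
    (pvItems base sym ext h t).map Prod.fst = (List.range t).map (fun (i : Nat) => (i : Int)) := by
  simp [pvItems, List.map_map, Function.comp]

theorem pvItems_keys_nodup (base : Int) (sym ext : List Char) (h t : Nat) :
    ((PySem.Dict.mk (pvItems base sym ext h t) : PySem.Dict Int Int)).keys.Nodup := by
  show ((pvItems base sym ext h t).map Prod.fst).Nodup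
  rw [pvItems_map_fst]
  exact (List.nodup_range).map (fun a b hab => by exact_mod_cast hab)

-- not-contains of the fresh key t
theorem pv_not_contains (base : Int) (sym ext : List Char) (h t : Nat) :
    ((PySem.Dict.mk (pvItems base sym ext h t) : PySem.Dict Int Int)).contains ((t : Nat) : Int) = false := by
  rw [← Bool.not_eq_true, PySem.Dict.contains_iff_mem_keys]
  intro hmem
  simp only [PySem.Dict.keys] at hmem
  rw [pvItems_map_fst] at hmem
  simp at hmem

-- nodup keys of the extended list
theorem pv_ext_keys_nodup (base : Int) (sym ext : List Char) (h t : Nat) (w : Int) :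
    ((PySem.Dict.mk (pvItems base sym ext h t ++ [((t : Int), w)]) : PySem.Dict Int Int)).keys.Nodup := by
  show ((pvItems base sym ext h t ++ [((t : Int), w)]).map Prod.fst).Nodup
  rw [List.map_append, pvItems_map_fst]
  simp only [List.map_cons, List.map_nil]
  rw [List.nodup_append]
  refine ⟨(List.nodup_range).map (fun a b hab => by exact_mod_cast hab), List.nodup_singleton _, ?_⟩
  intro x hx
  simp only [List.mem_map, List.mem_range] at hx
  obtain ⟨i, hi, rfl⟩ := hx
  simp
  omega

-- getD of the last entry
theorem pv_getD_last (base : Int) (sym ext : List Char) (h t : Nat) (w : Int) :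
    ((PySem.Dict.mk (pvItems base sym ext h t ++ [((t : Int), w)]) : PySem.Dict Int Int)).getD ((t : Nat) : Int) 0 = w := by
  apply PySem.Dict.getD_of_mem_items
  · simp
  · exact pv_ext_keys_nodup base sym ext h t w

-- inserting again at key t overwrites the last entry
theorem pv_insert_last (base : Int) (sym ext : List Char) (h t : Nat) (w w' : Int) :
    ((PySem.Dict.mk (pvItems base sym ext h t ++ [((t : Int), w)]) : PySem.Dict Int Int)).insert ((t : Nat) : Int) w'
      = ⟨pvItems base sym ext h t ++ [((t : Int), w')]⟩ := by
  have hc : ((PySem.Dict.mk (pvItems base sym ext h t ++ [((t : Int), w)]) : PySem.Dict Int Int)).contains ((t : Nat) : Int) = true := by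
    rw [PySem.Dict.contains_iff_mem_keys]
    show ((t : Int)) ∈ (pvItems base sym ext h t ++ [((t : Int), w)]).map Prod.fst
    simp
  have heta : ∀ (d : PySem.Dict Int Int), d = ⟨d.items⟩ := fun d => rfl
  rw [heta (PySem.Dict.insert _ _ _), PySem.Dict.items_insert_of_contains _ _ hc]
  show (⟨(pvItems base sym ext h t ++ [((t : Int), w)]).map _⟩ : PySem.Dict Int Int) = _
  rw [List.map_append]
  have h1 : (pvItems base sym ext h t).map (fun p => if (p.1 == ((t:Nat):Int)) = true then (((t:Nat):Int), w') else p) = pvItems base sym ext h t := by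
    conv_rhs => rw [← List.map_id (pvItems base sym ext h t)]
    apply List.map_congr_left
    intro p hp
    simp only [pvItems, List.mem_map, List.mem_range] at hp
    obtain ⟨i, hi, rfl⟩ := hp
    have hne : (((i : Int)) == ((t : Int))) = false := by simp; omega
    simp [hne]
  rw [h1]
  simp

theorem pv_getD_prev (base : Int) (sym ext : List Char) (h t : Nat) (ht : 1 ≤ t) :
    ((PySem.Dict.mk (pvItems base sym ext h t) : PySem.Dict Int Int)).getD (((t : Nat) : Int) - 1) 0
      = pvVal base sym ext h (t - 1) := by
  have hcast : ((t : Nat) : Int) - 1 = (((t - 1 : Nat)) : Int) := by omega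
  rw [hcast]
  apply PySem.Dict.getD_of_mem_items
  · show _ ∈ pvItems base sym ext h t
    simp only [pvItems, List.mem_map, List.mem_range]
    exact ⟨t - 1, by omega, rfl⟩
  · exact pvItems_keys_nodup base sym ext h t

theorem A_inv (base : Int) (sym ext : List Char) (h m : Nat) (hlen : ext.length = (m + h) + h) :
    ∀ t : Nat, 1 ≤ t → t ≤ m →
    (PySem.List.pyRange 1 (t : Int) 1).foldl
      (fun d i =>
        let d := d.insert i (d.getD (i - 1) 0)
        let d := if [PySem.List.pyGetD ext (i - 1) ' '] == sym then d.insert i (d.getD i 0 - 1) else d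
        let d := if [PySem.List.pyGetD ext (i + (h : Int) - 1) ' '] == sym then d.insert i (d.getD i 0 + 1) else d
        d)
      (PySem.Dict.insert PySem.Dict.empty 0 base)
      = ⟨pvItems base sym ext h t⟩ := by
  intro t
  induction t with
  | zero => omega
  | succ t ih =>
    intro _ htm
    by_cases ht0 : t = 0
    · subst ht0
      rw [show ((1 : Nat) : Int) = 1 by rfl, PySem.List.pyRange_one_eq_nil le_rfl, List.foldl_nil]
      show (⟨[((0:Int), base)]⟩ : PySem.Dict Int Int) = _
      simp [pvItems, pvVal, pvCnt, List.range_succ]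
    · have ht1 : 1 ≤ t := by omega
      have hcast : ((t + 1 : Nat) : Int) = (t : Int) + 1 := by push_cast; ring
      rw [hcast, PySem.List.pyRange_one_succ_right (by exact_mod_cast ht1), List.foldl_append,
        ih ht1 (by omega), List.foldl_cons, List.foldl_nil]
      simp only []
      have hidx1 : ((t : Nat) : Int) - 1 = (((t - 1 : Nat)) : Int) := by omega
      have hidx2 : ((t : Nat) : Int) + (h : Int) - 1 = (((t - 1 + h : Nat)) : Int) := by push_cast; omega
      have hlt1 : t - 1 < ext.length := by omega
      have hlt2 : t - 1 + h < ext.length := by omega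
      have hg1 : PySem.List.pyGetD ext (((t : Nat) : Int) - 1) ' ' = ext[t - 1] := by
        rw [hidx1, PySem.List.pyGetD_natCast, List.getD_eq_getElem _ _ hlt1]
      have hg2 : PySem.List.pyGetD ext (((t : Nat) : Int) + (h : Int) - 1) ' ' = ext[t - 1 + h] := by
        rw [hidx2, PySem.List.pyGetD_natCast, List.getD_eq_getElem _ _ hlt2]
      rw [hg1, hg2, pv_getD_prev base sym ext h t ht1]
      have heta : ∀ (d : PySem.Dict Int Int), d = ⟨d.items⟩ := fun d => rfl
      have hins1 : ((PySem.Dict.mk (pvItems base sym ext h t) : PySem.Dict Int Int)).insert ((t : Nat) : Int) (pvVal base sym ext h (t - 1))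
          = ⟨pvItems base sym ext h t ++ [(((t : Nat) : Int), pvVal base sym ext h (t - 1))]⟩ := by
        rw [heta (PySem.Dict.insert _ _ _),
          PySem.Dict.items_insert_of_not_contains _ _ (pv_not_contains base sym ext h t)]
      rw [hins1]
      set v0 := pvVal base sym ext h (t - 1) with hv0
      have step2 : ∀ (c : Bool) (w : Int),
          (if c = true then
            ((PySem.Dict.mk (pvItems base sym ext h t ++ [(((t:Nat):Int), w)]) : PySem.Dict Int Int)).insert ((t:Nat):Int)
              (((PySem.Dict.mk (pvItems base sym ext h t ++ [(((t:Nat):Int), w)]) : PySem.Dict Int Int)).getD ((t:Nat):Int) 0 - 1)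
          else ⟨pvItems base sym ext h t ++ [(((t:Nat):Int), w)]⟩)
          = ⟨pvItems base sym ext h t ++ [(((t:Nat):Int), w - (if c = true then 1 else 0))]⟩ := by
        intro c w
        cases c
        · simp
        · rw [pv_getD_last, pv_insert_last]
          simp
      have step3 : ∀ (c : Bool) (w : Int),
          (if c = true then
            ((PySem.Dict.mk (pvItems base sym ext h t ++ [(((t:Nat):Int), w)]) : PySem.Dict Int Int)).insert ((t:Nat):Int)
              (((PySem.Dict.mk (pvItems base sym ext h t ++ [(((t:Nat):Int), w)]) : PySem.Dict Int Int)).getD ((t:Nat):Int) 0 + 1)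
          else ⟨pvItems base sym ext h t ++ [(((t:Nat):Int), w)]⟩)
          = ⟨pvItems base sym ext h t ++ [(((t:Nat):Int), w + (if c = true then 1 else 0))]⟩ := by
        intro c w
        cases c
        · simp
        · rw [pv_getD_last, pv_insert_last]
          simp
      rw [step2 ([ext[t-1]] == sym) v0, step3 ([ext[t-1+h]] == sym) _]
      have hval : v0 - (if ([ext[t-1]] == sym) = true then 1 else 0) + (if ([ext[t-1+h]] == sym) = true then 1 else 0)
          = pvVal base sym ext h t := by
        have e1 : pvCnt sym ext (t - 1 + 1) = pvCnt sym ext (t - 1) + (if [ext[t-1]] == sym then 1 else 0) :=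
          pvCnt_succ sym ext (t - 1) hlt1
        have e2 : pvCnt sym ext (t - 1 + h + 1) = pvCnt sym ext (t - 1 + h) + (if [ext[t-1+h]] == sym then 1 else 0) :=
          pvCnt_succ sym ext (t - 1 + h) hlt2
        have ha : t - 1 + 1 = t := by omega
        have hb : t - 1 + h + 1 = t + h := by omega
        rw [ha] at e1
        rw [hb] at e2
        simp only [hv0, pvVal]
        rw [e1, e2]
        split_ifs <;> ring
      rw [hval]
      simp [pvItems, List.range_succ]


def pvScan (sym : List Char) (cs : List Char) (a : Int) : List Int :=
  match cs with
  | [] => []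
  | c :: cs' =>
    (a + (if [c] == sym then 1 else 0)) :: pvScan sym cs' (a + (if [c] == sym then 1 else 0))

theorem pvScan_foldl (sym : List Char) (cs : List Char) :
    ∀ (p : List Int) (a : Int), p.getLast? = some a →
    cs.foldl (fun pref c => pref ++ [PySem.List.pyGetD pref (-1) 0 + (if [c] == sym then 1 else 0)]) p
      = p ++ pvScan sym cs a := by
  induction cs with
  | nil => intro p a hp; simp [pvScan]
  | cons c cs ih =>
    intro p a hp
    have hne : p ≠ [] := by intro h; simp [h] at hp
    have hlast : PySem.List.pyGetD p (-1) 0 = a := by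
      rw [PySem.List.pyGetD_neg_one p 0 hne]
      exact List.getLast_of_mem_getLast? hp
    simp only [List.foldl_cons, hlast]
    rw [ih (p ++ [a + (if [c] == sym then 1 else 0)]) (a + (if [c] == sym then 1 else 0)) (by simp)]
    simp [pvScan]

theorem pvScan_eq_map (sym : List Char) (cs : List Char) :
    ∀ a : Int, (a :: pvScan sym cs a)
      = (List.range (cs.length + 1)).map (fun j => a + ((cs.take j).countP (fun c => [c] == sym) : Int)) := by
  induction cs with
  | nil => intro a; simp [pvScan]
  | cons c cs ih =>
    intro a
    rw [List.range_succ_eq_map, List.map_cons, List.map_map]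
    show a :: pvScan sym (c :: cs) a = _
    have h0 : a + ((List.countP (fun c => [c] == sym) (List.take 0 (c :: cs)) : Nat) : Int) = a := by simp
    rw [h0]
    show a :: ((a + _) :: pvScan sym cs _) = _
    congr 1
    rw [ih (a + (if [c] == sym then 1 else 0))]
    apply List.map_congr_left
    intro j _
    simp only [Function.comp_apply, Nat.succ_eq_add_one, List.take_succ_cons, List.countP_cons]
    split_ifs
    · simp
      ring
    · simp

theorem pref_eq (sym ext : List Char) :
    ext.foldl (fun pref c => pref ++ [PySem.List.pyGetD pref (-1) 0 + (if [c] == sym then 1 else 0)]) [(0 : Int)]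
      = (List.range (ext.length + 1)).map (fun j => pvCnt sym ext j) := by
  rw [pvScan_foldl sym ext [(0 : Int)] 0 (by simp)]
  rw [List.singleton_append, pvScan_eq_map sym ext 0]
  apply List.map_congr_left
  intro j _
  simp [pvCnt]

theorem B_inv (bval : Int → Int) :
    ∀ t : Nat,
    (PySem.List.pyRange 0 (t : Int) 1).foldl (fun d i => d.insert i (bval i))
      (PySem.Dict.empty : PySem.Dict Int Int)
      = ⟨(List.range t).map (fun (i : Nat) => ((i : Int), bval (i : Int)))⟩ := by
  intro t
  induction t with
  | zero => simp [PySem.List.pyRange_one_eq_nil, PySem.Dict.empty]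
  | succ t ih =>
    have : ((t + 1 : Nat) : Int) = (t : Int) + 1 := by push_cast; ring
    rw [this, PySem.List.pyRange_one_succ_right (by positivity), List.foldl_append]
    rw [ih]
    simp only [List.foldl_cons, List.foldl_nil]
    have hnc : (PySem.Dict.mk ((List.range t).map (fun (i : Nat) => ((i : Int), bval (i : Int)))) : PySem.Dict Int Int).contains (t : Int) = false := by
      rw [← Bool.not_eq_true, PySem.Dict.contains_iff_mem_keys]
      intro hmem
      simp [PySem.Dict.keys, List.map_map] at hmem
    have := PySem.Dict.items_insert_of_not_contains _ (bval (t : Int)) hnc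
    have heta : ∀ (d : PySem.Dict Int Int), d = ⟨d.items⟩ := fun d => rfl
    rw [heta (PySem.Dict.insert _ _ _), this]
    simp [List.range_succ]

-- ===== VERDICT helpers =====
theorem d0_eq (base : Int) (sym ext : List Char) (h : Nat) :
    (PySem.Dict.insert PySem.Dict.empty 0 base : PySem.Dict Int Int) = ⟨pvItems base sym ext h 1⟩ := by
  show (⟨[((0:Int), base)]⟩ : PySem.Dict Int Int) = _
  simp [pvItems, pvVal, pvCnt, List.range_succ]

-- A's items on any input, as the closed list pvItems (m = n - n//2, which is ≥ 1 unless g = [])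
theorem symbolarray_items (genome symbol : String) :
    symbolarray genome symbol
      = pvItems (patcountPort symbol.toList (genome.toList.take (genome.toList.length / 2)))
          symbol.toList
          (genome.toList ++ genome.toList.take (genome.toList.length / 2))
          (genome.toList.length / 2)
          (max 1 (genome.toList.length - genome.toList.length / 2)) := by
  unfold symbolarray
  set g := genome.toList with hg
  set sym := symbol.toList with hsym
  have hfd : PySem.Int.floordiv ((g.length : Int)) 2 = ((g.length / 2 : Nat) : Int) := by
    rw [show (2:Int) = ((2:Nat):Int) from rfl, PySem.Int.floordiv_natCast]
  simp only [hfd, PySem.List.slice_zero_start, PySem.List.slice_to_natCast]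
  set L := g.length with hL
  set hh := L / 2 with hhh
  set m := L - hh with hm
  set ext := g ++ g.take hh with hext
  set base := patcountPort sym (g.take hh) with hbase
  have hextlen : ext.length = (m + hh) + hh := by
    simp [hext, List.length_take]
    omega
  have hnm : (L : Int) - (hh : Int) = ((m : Nat) : Int) := by omega
  rw [hnm]
  by_cases hm1 : 1 ≤ m
  · rw [show (max 1 m) = m by omega]
    exact congrArg PySem.Dict.items (A_inv base sym ext hh m hextlen m hm1 le_rfl)
  · rw [show (max 1 m) = 1 by omega, show ((m : Nat) : Int) = ((0:Nat):Int) by omega]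
    rw [PySem.List.pyRange_one_eq_nil (by simp), List.foldl_nil]
    exact congrArg PySem.Dict.items (d0_eq base sym ext hh)

-- B's items on any input: seed plus entered-minus-left prefix differences
theorem symbolarray_alt_items (genome symbol : String) :
    symbolarray_alt genome symbol
      = (List.range (genome.toList.length - genome.toList.length / 2)).map
          (fun (i : Nat) =>
            ((i : Int),
              patcountPort symbol.toList (genome.toList.take (genome.toList.length / 2))
              + (pvCnt symbol.toList (genome.toList ++ genome.toList.take (genome.toList.length / 2)) (genome.toList.length / 2 + i)
                 - pvCnt symbol.toList (genome.toList ++ genome.toList.take (genome.toList.length / 2)) (genome.toList.length / 2))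
              - pvCnt symbol.toList (genome.toList ++ genome.toList.take (genome.toList.length / 2)) i)) := by
  unfold symbolarray_alt
  set g := genome.toList with hg
  set sym := symbol.toList with hsym
  have hfd : PySem.Int.floordiv ((g.length : Int)) 2 = ((g.length / 2 : Nat) : Int) := by
    rw [show (2:Int) = ((2:Nat):Int) from rfl, PySem.Int.floordiv_natCast]
  simp only [hfd, PySem.List.slice_zero_start, PySem.List.slice_to_natCast]
  set L := g.length with hL
  set hh := L / 2 with hhh
  set m := L - hh with hm
  set ext := g ++ g.take hh with hext
  set base := patcountPort sym (g.take hh) with hbase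
  have hextlen : ext.length = (m + hh) + hh := by
    simp [hext, List.length_take]
    omega
  have hnm : (L : Int) - (hh : Int) = ((m : Nat) : Int) := by omega
  rw [hnm]
  rw [congrArg PySem.Dict.items (B_inv (fun i : Int =>
      base + (PySem.List.pyGetD (ext.foldl
          (fun matched c => matched ++ [PySem.List.pyGetD matched (-1) 0 + (if [c] == sym then 1 else 0)]) [(0 : Int)]) (((hh : Nat) : Int) + i) 0
        - PySem.List.pyGetD (ext.foldl
          (fun matched c => matched ++ [PySem.List.pyGetD matched (-1) 0 + (if [c] == sym then 1 else 0)]) [(0 : Int)]) ((hh : Nat) : Int) 0)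
        - PySem.List.pyGetD (ext.foldl
          (fun matched c => matched ++ [PySem.List.pyGetD matched (-1) 0 + (if [c] == sym then 1 else 0)]) [(0 : Int)]) i 0) m)]
  show (List.range m).map _ = _
  apply List.map_congr_left
  intro i hi
  simp only [List.mem_range] at hi
  rw [pref_eq sym ext]
  have h1 : PySem.List.pyGetD ((List.range (ext.length + 1)).map (fun j => pvCnt sym ext j)) (((hh : Nat) : Int) + ((i : Nat) : Int)) 0 = pvCnt sym ext (hh + i) := by
    rw [show ((hh : Nat) : Int) + ((i : Nat) : Int) = (((hh + i : Nat)) : Int) by push_cast; ring]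
    rw [PySem.List.pyGetD_natCast, PySem.List.getD_map_range _ _ _ _ (by omega)]
  have h2 : PySem.List.pyGetD ((List.range (ext.length + 1)).map (fun j => pvCnt sym ext j)) ((hh : Nat) : Int) 0 = pvCnt sym ext hh := by
    rw [PySem.List.pyGetD_natCast, PySem.List.getD_map_range _ _ _ _ (by omega)]
  have h3 : PySem.List.pyGetD ((List.range (ext.length + 1)).map (fun j => pvCnt sym ext j)) ((i : Nat) : Int) 0 = pvCnt sym ext i := by
    rw [PySem.List.pyGetD_natCast, PySem.List.getD_map_range _ _ _ _ (by omega)]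
  rw [h1, h2, h3]

-- ===== VERDICT (by name: the statement is the Claim_ definitions above) =====
theorem symbolarray_spec : Claim_equal_symbolarray := by
  intro genome symbol _ hpre
  show symbolarray genome symbol = symbolarray_alt genome symbol
  have hg : genome.toList ≠ [] := hpre
  rw [symbolarray_items, symbolarray_alt_items]
  have hm1 : 1 ≤ genome.toList.length - genome.toList.length / 2 := by
    have h0 : 0 < genome.toList.length := List.length_pos_of_ne_nil hg
    omega
  rw [show max 1 (genome.toList.length - genome.toList.length / 2)
      = genome.toList.length - genome.toList.length / 2 by omega]
  unfold pvItems
  apply List.map_congr_left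
  intro i _
  rw [pvVal, Nat.add_comm i (genome.toList.length / 2)]
  ring_nf
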